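-- pv_equiv track=rewrite | github.com/whirleyjoshua-netizen/ThreeTurkey | seo_saas/services/audit_engine.py | _score_page
-- ===== SOURCE A (Python) =====
-- def _score_page(issues: list[tuple[str, str, str]]) -> int:
--     """Score a page 0-100 based on issues found."""
--     score = 100
--     for severity, _, _ in issues:
--         if severity == "critical":
--             score -= 15
--         elif severity == "warning":
--             score -= 5
--         elif severity == "info":
--             score -= 2
--     return max(0, score)
-- ===== SOURCE B (Python) =====
-- from itertools import groupby
--
-- _WEIGHTS = {"critical": 15, "warning": 5, "info": 2}
--
--
-- def _score_page(issues: list[tuple[str, str, str]]) -> int: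
--     """Score a page 0-100 based on issues found."""
--     severities = sorted(sev for sev, _, _ in issues)
--     deduction = 0
--     for sev, run in groupby(severities):
--         deduction += _WEIGHTS.get(sev, 0) * sum(1 for _ in run)
--     return max(0, 100 - deduction)
-- ===== Notes on version B (the rewrite author's own statement) =====
-- stated objective: alternative
-- what changed: Replaced the inline if/elif per-item penalty accumulation with sort + groupby run-length encoding of severities, combining a weight-table lookup times each run length.
import Mathlib
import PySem

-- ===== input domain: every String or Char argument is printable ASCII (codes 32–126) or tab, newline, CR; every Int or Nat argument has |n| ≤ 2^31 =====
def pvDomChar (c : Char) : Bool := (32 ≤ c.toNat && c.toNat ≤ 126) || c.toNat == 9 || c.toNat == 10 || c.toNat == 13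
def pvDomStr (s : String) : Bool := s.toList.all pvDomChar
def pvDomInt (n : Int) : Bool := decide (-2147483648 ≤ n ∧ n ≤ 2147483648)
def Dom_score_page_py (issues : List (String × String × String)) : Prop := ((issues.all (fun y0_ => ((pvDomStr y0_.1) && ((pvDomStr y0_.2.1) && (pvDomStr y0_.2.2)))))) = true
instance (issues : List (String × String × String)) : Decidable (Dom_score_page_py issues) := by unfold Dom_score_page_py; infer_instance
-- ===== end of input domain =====

-- B sorts the severities and combines a weight-table lookup with run-length encoding of consecutive groups (alternative algorithm; O(n log n) vs A's O(n)).


-- ===== PORT A =====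
-- Port of A: inline if/elif penalty accumulation, then max(0, score).
def score_page_py (issues : List (String × String × String)) : Int :=
  let score : Int :=
    issues.foldl (fun score t =>
      if t.1 == "critical" then score - 15
      else if t.1 == "warning" then score - 5
      else if t.1 == "info" then score - 2
      else score) 100
  max 0 score

-- ===== PORT B =====
-- Port of B: the _WEIGHTS dict literal.
def pvWeights : PySem.Dict String Int :=
  PySem.Dict.ofList [("critical", 15), ("warning", 5), ("info", 2)]

-- Hand port of itertools.groupby over a list of keys, fused with the per-group
-- 'sum(1 for _ in run)': run-length encoding of consecutive equal elements
-- (exact: groupby groups maximal consecutive runs, and B only uses key and run length).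
def pvRuns : List String → List (String × Int)
  | [] => []
  | x :: xs =>
    match pvRuns xs with
    | [] => [(x, 1)]
    | (y, k) :: rest =>
      if x == y then (x, k + 1) :: rest else (x, 1) :: (y, k) :: rest

-- Port of B: sort the severities, group consecutive runs, combine weight × run length.
def score_page_py_alt (issues : List (String × String × String)) : Int :=
  let severities := PySem.List.sorted (issues.map (fun t => t.1)) (fun s => s) false
  let deduction :=
    (pvRuns severities).foldl (fun acc p => acc + pvWeights.getD p.1 0 * p.2) 0
  max 0 (100 - deduction)

-- ===== PRECONDITION & SPEC =====
def Spec_score_page_py (issues : List (String × String × String)) (out : Int) : Prop := out = score_page_py_alt issues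
instance (issues : List (String × String × String)) (out : Int) : Decidable (Spec_score_page_py issues out) := by unfold Spec_score_page_py; infer_instance

-- ===== CLAIM (what is proved, stated in full; the proofs are below) =====
def Claim_equal_score_page_py : Prop := ∀ (issues : List (String × String × String)), Dom_score_page_py issues → Spec_score_page_py issues (score_page_py issues)

-- ===== LEMMAS AND PROOFS =====
-- weight of one severity as an if-chain
lemma weight_eq (s : String) :
    pvWeights.getD s 0 =
      (if s == "critical" then (15 : Int)
       else if s == "warning" then 5
       else if s == "info" then 2 else 0) := by
  have hmk : pvWeights = PySem.Dict.mk [("critical", 15), ("warning", 5), ("info", 2)] := by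
    decide
  rw [hmk]
  simp only [PySem.Dict.getD, PySem.Dict.get?_mk_cons]
  by_cases h1 : s = "critical"
  · simp [h1]
  by_cases h2 : s = "warning"
  · simp [h2]
  by_cases h3 : s = "info"
  · simp [h3]
  rw [if_neg (by simp [beq_iff_eq]; exact fun h => h1 h.symm),
      if_neg (by simp [beq_iff_eq]; exact fun h => h2 h.symm),
      if_neg (by simp [beq_iff_eq]; exact fun h => h3 h.symm)]
  simp [h1, h2, h3]
  rfl

-- weighted sum over the run-length encoding = weighted sum over the list
lemma runs_weighted_sum (w : String → Int) (xs : List String) :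
    ((pvRuns xs).map (fun p => w p.1 * p.2)).sum = (xs.map w).sum := by
  induction xs with
  | nil => simp [pvRuns]
  | cons x t ih =>
    cases hr : pvRuns t with
    | nil =>
      have ht : t = [] := by
        cases t with
        | nil => rfl
        | cons a u =>
          exfalso
          simp only [pvRuns] at hr
          rcases h : pvRuns u with _ | ⟨⟨y, k⟩, rest⟩ <;> rw [h] at hr
          · simp at hr
          · by_cases hay : a == y <;> simp [hay] at hr
      subst ht; simp [pvRuns]
    | cons p rest =>
      obtain ⟨y, k⟩ := p
      rw [hr] at ih
      simp only [pvRuns, hr]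
      by_cases hxy : x = y
      · subst hxy
        simp only [beq_self_eq_true, if_true, List.map_cons, List.sum_cons] at ih ⊢
        linarith [ih]
      · simp only [hxy, not_false_eq_true, if_neg,
          beq_iff_eq, List.map_cons, List.sum_cons] at ih ⊢
        linarith [ih]

-- A's loop as 100 minus the weighted sum
lemma a_loop_eq (xs : List (String × String × String)) (s : Int) :
    xs.foldl (fun score t =>
      if t.1 == "critical" then score - 15
      else if t.1 == "warning" then score - 5
      else if t.1 == "info" then score - 2
      else score) s
    = s - ((xs.map (fun t => pvWeights.getD t.1 0)).sum) := by
  induction xs generalizing s with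
  | nil => simp
  | cons a t ih =>
    simp only [List.foldl_cons, List.map_cons, List.sum_cons, ih, weight_eq]
    split_ifs <;> simp_all <;> ring

-- ===== VERDICT (by name: the statement is the Claim_ definition above) =====
theorem score_page_py_spec : Claim_equal_score_page_py := by
  intro issues _
  unfold Spec_score_page_py score_page_py score_page_py_alt
  rw [a_loop_eq]
  have hperm : (PySem.List.sorted (issues.map (fun t => t.1)) (fun s => s) false).Perm
      (issues.map (fun t => t.1)) := PySem.List.sorted_perm _ _ _
  have hfold : ∀ (l : List (String × Int)) (init : Int),
      l.foldl (fun acc p => acc + pvWeights.getD p.1 0 * p.2) init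
        = init + (l.map (fun p => pvWeights.getD p.1 0 * p.2)).sum := by
    intro l
    induction l with
    | nil => simp
    | cons a t ih => intro init; simp [ih]; ring
  simp only [hfold, zero_add]
  rw [runs_weighted_sum (fun s => pvWeights.getD s 0),
    (hperm.map (fun s => pvWeights.getD s 0)).sum_eq, List.map_map]
  rfl
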